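-- pv_equiv track=rewrite | github.com/stefsoliveira/probcomp-1 | loboMau.py | findSheepsOnPastures
-- ===== SOURCE A (Python) =====
-- def findSheepsOnPastures(pastures, sheeps):
--     sheepsOnPastures = [0] * len(pastures)
--     for pasture in range(len(pastures)):
--         for coordinate in range(len(pastures[pasture])):
--             for sheep in range(len(sheeps)):
--                 if pastures[pasture][coordinate] == sheeps[sheep]:
--                     sheepsOnPastures[pasture] = sheepsOnPastures[pasture] + 1
--     return sheepsOnPastures
-- ===== SOURCE B (Python) =====
-- def findSheepsOnPastures(pastures, sheeps):
--     # inverted index: coordinate value -> pasture indices (one entry per occurrence)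
--     index = {}
--     for p, pasture in enumerate(pastures):
--         for c in pasture:
--             index.setdefault(c, []).append(p)
--     result = [0] * len(pastures)
--     for s in sheeps:
--         for p in index.get(s, []):
--             result[p] += 1
--     return result
-- ===== Notes on version B (the rewrite author's own statement) =====
-- stated objective: alternative
-- what changed: Replaces the triple nested scan (for every pasture coordinate, rescan all sheeps) by a prebuilt inverted index from coordinate value to pasture indices, then a single pass over sheeps that scatters increments into the result; cost drops from O(P*C*S) to O(P*C + S + M) with M the number of matching (sheep, coordinate) pairs, which is the same order only when almost all pairs match.
import Mathlib
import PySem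

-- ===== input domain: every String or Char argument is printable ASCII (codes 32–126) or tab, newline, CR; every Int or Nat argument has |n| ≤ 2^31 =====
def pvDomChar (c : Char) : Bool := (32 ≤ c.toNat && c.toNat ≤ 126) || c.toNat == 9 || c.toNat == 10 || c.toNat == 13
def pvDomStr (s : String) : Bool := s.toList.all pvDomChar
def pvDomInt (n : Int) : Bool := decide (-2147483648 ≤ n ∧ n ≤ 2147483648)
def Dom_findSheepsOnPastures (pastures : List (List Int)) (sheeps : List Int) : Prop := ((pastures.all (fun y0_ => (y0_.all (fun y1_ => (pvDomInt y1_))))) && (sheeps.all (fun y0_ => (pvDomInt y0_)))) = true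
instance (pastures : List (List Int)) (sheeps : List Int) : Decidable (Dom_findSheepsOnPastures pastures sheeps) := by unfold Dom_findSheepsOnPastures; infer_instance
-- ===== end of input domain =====

-- B replaces A's triple nested scan by an inverted index (coordinate value -> pasture indices)
-- plus one scatter pass over sheeps; the return values are proved equal on all inputs.

-- ===== PORT A =====
def findSheepsOnPastures (pastures : List (List Int)) (sheeps : List Int) : List Int :=
  (PySem.List.pyRange 0 (pastures.length : Int) 1).foldl (fun acc pasture =>
    (PySem.List.pyRange 0 ((PySem.List.pyGetD pastures pasture []).length : Int) 1).foldl (fun acc coordinate =>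
      (PySem.List.pyRange 0 (sheeps.length : Int) 1).foldl (fun acc sheep =>
        if PySem.List.pyGetD (PySem.List.pyGetD pastures pasture []) coordinate 0
             = PySem.List.pyGetD sheeps sheep 0
        then PySem.List.pySetD acc pasture (PySem.List.pyGetD acc pasture 0 + 1)
        else acc) acc) acc)
    (List.replicate pastures.length 0)

-- ===== PORT B =====
-- index.setdefault(c, []).append(p)  ==  index[c] = index.get(c, []) + [p]  ==  Dict.modify
def pvBuildIndex (pastures : List (List Int)) : PySem.Dict Int (List Int) :=
  (PySem.List.enumerate pastures 0).foldl
    (fun d pe => pe.2.foldl (fun d c => d.modify c [] (· ++ [pe.1])) d)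
    PySem.Dict.empty

-- result[p] += 1 is ported with pySetD/pyGetD (exact here: every p stored in the index is a valid index)
def findSheepsOnPastures_alt (pastures : List (List Int)) (sheeps : List Int) : List Int :=
  let index := pvBuildIndex pastures
  sheeps.foldl (fun res s =>
      (index.getD s []).foldl
        (fun res p => PySem.List.pySetD res p (PySem.List.pyGetD res p 0 + 1)) res)
    (List.replicate pastures.length 0)

-- ===== PRECONDITION & SPEC =====
def Spec_findSheepsOnPastures (pastures : List (List Int)) (sheeps : List Int) (out : List Int) : Prop := out = findSheepsOnPastures_alt pastures sheeps
instance (pastures : List (List Int)) (sheeps : List Int) (out : List Int) : Decidable (Spec_findSheepsOnPastures pastures sheeps out) := by unfold Spec_findSheepsOnPastures; infer_instance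

-- ===== CLAIM (what is proved, stated in full; the proofs are below) =====
def Claim_equal_findSheepsOnPastures : Prop := ∀ (pastures : List (List Int)) (sheeps : List Int), Dom_findSheepsOnPastures pastures sheeps → Spec_findSheepsOnPastures pastures sheeps (findSheepsOnPastures pastures sheeps)

-- ===== LEMMAS AND PROOFS =====

lemma pvGetD_set (xs : List Int) (m j : Nat) (v d : Int) (hm : m < xs.length) :
    (xs.set m v).getD j d = if j = m then v else xs.getD j d := by
  rcases eq_or_ne j m with rfl | hne
  · simp [List.getD_eq_getElem?_getD, hm]
  · simp [List.getD_eq_getElem?_getD, List.getElem?_set_ne (Ne.symm hne), hne]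

lemma pvSetGet (xs : List Int) (p : Int) (d v : Int) (h0 : 0 ≤ p) (h1 : p < (xs.length:Int)) :
    PySem.List.pySetD xs p v = xs.set p.toNat v ∧ PySem.List.pyGetD xs p d = xs.getD p.toNat d := by
  refine ⟨PySem.List.pySetD_of_nonneg xs v h0, ?_⟩
  rw [PySem.List.pyGetD_eq_getElem _ _ h0 (by exact_mod_cast h1)]
  exact List.getElem_eq_getD d

lemma pvInner (S : List Int) (c p : Int) : ∀ (acc : List Int), 0 ≤ p → p < (acc.length:Int) →
    ((S.foldl (fun a s => if c = s then PySem.List.pySetD a p (PySem.List.pyGetD a p 0 + 1) else a) acc).length = acc.length ∧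
     ∀ j : Nat, j < acc.length →
      (S.foldl (fun a s => if c = s then PySem.List.pySetD a p (PySem.List.pyGetD a p 0 + 1) else a) acc).getD j 0
        = acc.getD j 0 + if (j : Int) = p then (S.count c : Int) else 0) := by
  induction S with
  | nil => intro acc h0 h1; simp
  | cons s t ih =>
    intro acc h0 h1
    by_cases hc : c = s
    · simp only [List.foldl_cons, if_pos hc]
      obtain ⟨hset, hget⟩ := pvSetGet acc p 0 (PySem.List.pyGetD acc p 0 + 1) h0 h1
      rw [hset]
      have hlen : (acc.set p.toNat (PySem.List.pyGetD acc p 0 + 1)).length = acc.length := by simp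
      obtain ⟨ihl, ihv⟩ := ih (acc.set p.toNat (PySem.List.pyGetD acc p 0 + 1)) h0 (by rw [hlen]; exact h1)
      refine ⟨by rw [ihl, hlen], ?_⟩
      intro j hj
      rw [ihv j (by rw [hlen]; exact hj)]
      rw [pvGetD_set acc p.toNat j _ 0 (by omega), hget]
      have hcnt : ((s :: t).count c : Int) = (t.count c : Int) + 1 := by
        simp [hc]
      by_cases hjp : (j : Int) = p
      · have h4 : j = p.toNat := by omega
        rw [if_pos hjp, if_pos hjp, if_pos h4, hcnt]
        have h5 : p.toNat = j := by omega
        rw [h5]; ring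
      · have h4 : j ≠ p.toNat := by omega
        rw [if_neg hjp, if_neg hjp, if_neg h4]
    · simp only [List.foldl_cons, if_neg hc]
      obtain ⟨ihl, ihv⟩ := ih acc h0 h1
      refine ⟨ihl, ?_⟩
      intro j hj
      rw [ihv j hj]
      have h4 : ((s :: t).count c : Int) = (t.count c : Int) := by
        simp [Ne.symm hc]
      rw [h4]

lemma pvMid (P S : List Int) (p : Int) : ∀ (acc : List Int), 0 ≤ p → p < (acc.length:Int) →
    ((P.foldl (fun acc c => S.foldl (fun a s => if c = s then PySem.List.pySetD a p (PySem.List.pyGetD a p 0 + 1) else a) acc) acc).length = acc.length ∧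
     ∀ j : Nat, j < acc.length →
      (P.foldl (fun acc c => S.foldl (fun a s => if c = s then PySem.List.pySetD a p (PySem.List.pyGetD a p 0 + 1) else a) acc) acc).getD j 0
        = acc.getD j 0 + if (j : Int) = p then (P.map (fun c => (S.count c : Int))).sum else 0) := by
  induction P with
  | nil => intro acc h0 h1; simp
  | cons c t ih =>
    intro acc h0 h1
    simp only [List.foldl_cons]
    obtain ⟨il, iv⟩ := pvInner S c p acc h0 h1
    obtain ⟨ihl, ihv⟩ := ih _ h0 (by rw [il]; exact h1)
    refine ⟨by rw [ihl, il], ?_⟩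
    intro j hj
    rw [ihv j (by rw [il]; exact hj), iv j hj]
    simp only [List.map_cons, List.sum_cons]
    by_cases hjp : (j : Int) = p
    · rw [if_pos hjp, if_pos hjp, if_pos hjp]; ring
    · rw [if_neg hjp, if_neg hjp, if_neg hjp]; ring

lemma pvMidCollapse (P S : List Int) (p : Int) (acc : List Int) :
    (PySem.List.pyRange 0 (P.length:Int) 1).foldl (fun acc coordinate =>
      (PySem.List.pyRange 0 (S.length:Int) 1).foldl (fun a sheep =>
        if PySem.List.pyGetD P coordinate 0 = PySem.List.pyGetD S sheep 0
        then PySem.List.pySetD a p (PySem.List.pyGetD a p 0 + 1) else a) acc) acc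
    = P.foldl (fun acc c => S.foldl (fun a s => if c = s then PySem.List.pySetD a p (PySem.List.pyGetD a p 0 + 1) else a) acc) acc := by
  rw [PySem.List.foldl_pyRange_zero_pyGetD' P 0
    (fun acc c => (PySem.List.pyRange 0 (S.length:Int) 1).foldl (fun a sheep =>
      if c = PySem.List.pyGetD S sheep 0
      then PySem.List.pySetD a p (PySem.List.pyGetD a p 0 + 1) else a) acc) acc]
  exact PySem.List.foldl_congr_mem P _ _ acc (fun acc c _ =>
    PySem.List.foldl_pyRange_zero_pyGetD' S 0
      (fun a s => if c = s then PySem.List.pySetD a p (PySem.List.pyGetD a p 0 + 1) else a) acc)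

lemma pvOuter (pastures : List (List Int)) (S : List Int) : ∀ (k : Nat) (a : Int) (acc : List Int), 0 ≤ a → acc.length = pastures.length → k = (((pastures.length:Int)) - a).toNat →
    (((PySem.List.pyRange a (pastures.length:Int) 1).foldl (fun acc pasture =>
       (PySem.List.pyRange 0 ((PySem.List.pyGetD pastures pasture []).length:Int) 1).foldl (fun acc coordinate =>
         (PySem.List.pyRange 0 (S.length:Int) 1).foldl (fun b sheep =>
           if PySem.List.pyGetD (PySem.List.pyGetD pastures pasture []) coordinate 0 = PySem.List.pyGetD S sheep 0
           then PySem.List.pySetD b pasture (PySem.List.pyGetD b pasture 0 + 1) else b) acc) acc) acc).length = acc.length ∧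
     ∀ j : Nat, j < acc.length →
      ((PySem.List.pyRange a (pastures.length:Int) 1).foldl (fun acc pasture =>
       (PySem.List.pyRange 0 ((PySem.List.pyGetD pastures pasture []).length:Int) 1).foldl (fun acc coordinate =>
         (PySem.List.pyRange 0 (S.length:Int) 1).foldl (fun b sheep =>
           if PySem.List.pyGetD (PySem.List.pyGetD pastures pasture []) coordinate 0 = PySem.List.pyGetD S sheep 0
           then PySem.List.pySetD b pasture (PySem.List.pyGetD b pasture 0 + 1) else b) acc) acc) acc).getD j 0
        = acc.getD j 0 + if a ≤ (j : Int) then ((pastures.getD j []).map (fun c => (S.count c : Int))).sum else 0) := by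
  intro k
  induction k with
  | zero =>
    intro a acc h0 hlen hk
    have hnil : PySem.List.pyRange a (pastures.length:Int) 1 = [] :=
      PySem.List.pyRange_one_eq_nil (by omega)
    rw [hnil]
    refine ⟨rfl, ?_⟩
    intro j hj
    have h4 : ¬ (a ≤ (j:Int)) := by omega
    simp [h4]
  | succ k ih =>
    intro a acc h0 hlen hk
    have hlt : a < (pastures.length:Int) := by omega
    rw [PySem.List.pyRange_one_cons hlt]
    simp only [List.foldl_cons]
    rw [pvMidCollapse (PySem.List.pyGetD pastures a []) S a acc]
    obtain ⟨ml, mv⟩ := pvMid (PySem.List.pyGetD pastures a []) S a acc h0 (by omega)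
    obtain ⟨ihl, ihv⟩ := ih (a+1) _ (by omega) (by rw [ml]; exact hlen) (by omega)
    refine ⟨by rw [ihl, ml], ?_⟩
    intro j hj
    rw [ihv j (by rw [ml]; exact hj), mv j hj]
    have hP : PySem.List.pyGetD pastures a [] = pastures.getD a.toNat [] := by
      rw [PySem.List.pyGetD_eq_getElem _ _ h0 (by omega)]
      exact List.getElem_eq_getD []
    by_cases hja : (j:Int) = a
    · have h1 : a.toNat = j := by omega
      have h2 : a ≤ (j:Int) := by omega
      have h3 : ¬ (a + 1 ≤ (j:Int)) := by omega
      rw [hP, h1, if_pos hja, if_pos h2, if_neg h3]; ring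
    · by_cases h2 : a + 1 ≤ (j:Int)
      · rw [if_neg hja, if_pos h2, if_pos (by omega : a ≤ (j:Int))]; ring
      · rw [if_neg hja, if_neg h2, if_neg (by omega : ¬ a ≤ (j:Int))]; ring

lemma pvA_char (pastures : List (List Int)) (sheeps : List Int) :
    (findSheepsOnPastures pastures sheeps).length = pastures.length ∧
    ∀ j : Nat, j < pastures.length →
      (findSheepsOnPastures pastures sheeps).getD j 0
        = ((pastures.getD j []).map (fun c => (sheeps.count c : Int))).sum := by
  unfold findSheepsOnPastures
  obtain ⟨hl, hv⟩ := pvOuter pastures sheeps ((pastures.length:Int) - 0).toNat 0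
    (List.replicate pastures.length 0) le_rfl (by simp) rfl
  refine ⟨by rw [hl]; simp, ?_⟩
  intro j hj
  rw [hv j (by simp [hj])]
  simp

lemma pvIdxInner (xs : List Int) (d : PySem.Dict Int (List Int)) (p c : Int) :
    (xs.foldl (fun d x => d.modify x [] (· ++ [p])) d).getD c []
      = d.getD c [] ++ List.replicate (xs.count c) p := by
  have h := PySem.Dict.getD_foldl_modify_append (xs.map (fun x => (x, p))) d c
  rw [List.foldl_map] at h
  rw [h]
  congr 1
  rw [List.filter_map, List.map_map]
  simp only [Function.comp_def]
  rw [List.map_const']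
  rw [List.count_eq_countP, ← List.countP_eq_length_filter]

lemma pvIdxFold : ∀ (l : List (Int × List Int)) (d : PySem.Dict Int (List Int)) (c : Int),
    ((l.foldl (fun d pe => pe.2.foldl (fun d x => d.modify x [] (· ++ [pe.1])) d) d).getD c [])
      = d.getD c [] ++ l.flatMap (fun pe => List.replicate (pe.2.count c) pe.1) := by
  intro l
  induction l with
  | nil => intro d c; simp
  | cons pe t ih =>
    intro d c
    simp only [List.foldl_cons, List.flatMap_cons]
    rw [ih, pvIdxInner]
    simp [List.append_assoc]

lemma pvIdxGetD (pastures : List (List Int)) (c : Int) :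
    (pvBuildIndex pastures).getD c []
      = (PySem.List.enumerate pastures 0).flatMap (fun pe => List.replicate (pe.2.count c) pe.1) := by
  unfold pvBuildIndex
  rw [pvIdxFold]
  simp

lemma pvIdxMemBound (ps : List (List Int)) (s c q : Int)
    (h : q ∈ (PySem.List.enumerate ps s).flatMap (fun pe => List.replicate (pe.2.count c) pe.1)) :
    s ≤ q ∧ q < s + (ps.length : Int) := by
  rw [List.mem_flatMap] at h
  obtain ⟨pe, hpe, hq⟩ := h
  rw [List.eq_of_mem_replicate hq]
  rw [PySem.List.mem_enumerate_iff] at hpe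
  obtain ⟨k, hk, rfl⟩ := hpe
  constructor <;> [omega; (push_cast; omega)]

lemma pvIdxCount : ∀ (ps : List (List Int)) (s c : Int) (j : Nat), j < ps.length →
    ((PySem.List.enumerate ps s).flatMap (fun pe => List.replicate (pe.2.count c) pe.1)).count (s + (j:Int))
      = (ps.getD j []).count c := by
  intro ps
  induction ps with
  | nil => intro s c j hj; simp at hj
  | cons x t ih =>
    intro s c j hj
    rw [PySem.List.enumerate_cons]
    simp only [List.flatMap_cons]
    rw [List.count_append]
    cases j with
    | zero =>
      have h1 : (List.replicate (x.count c) s).count (s + ((0:Nat):Int)) = x.count c := by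
        simp
      have h2 : (((PySem.List.enumerate t (s+1)).flatMap (fun pe => List.replicate (pe.2.count c) pe.1)).count (s + ((0:Nat):Int))) = 0 := by
        rw [List.count_eq_zero]
        intro hmem
        have := pvIdxMemBound t (s+1) c _ hmem
        omega
      rw [h1, h2]
      simp
    | succ k =>
      have h1 : (List.replicate (x.count c) s).count (s + ((k+1:Nat):Int)) = 0 := by
        rw [List.count_replicate]
        simp
        intro h
        omega
      rw [h1]
      have h2 : s + ((k+1:Nat):Int) = (s+1) + (k:Int) := by push_cast; ring
      rw [h2, ih (s+1) c k (by simpa using hj)]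
      simp

lemma pvScatOne : ∀ (ps : List Int) (res : List Int), (∀ p ∈ ps, 0 ≤ p ∧ p < (res.length:Int)) →
    ((ps.foldl (fun r p => PySem.List.pySetD r p (PySem.List.pyGetD r p 0 + 1)) res).length = res.length ∧
     ∀ j : Nat, j < res.length →
      (ps.foldl (fun r p => PySem.List.pySetD r p (PySem.List.pyGetD r p 0 + 1)) res).getD j 0
        = res.getD j 0 + (ps.count (j:Int) : Int)) := by
  intro ps
  induction ps with
  | nil => intro res _; simp
  | cons p t ih =>
    intro res hb
    obtain ⟨h0, h1⟩ := hb p (List.mem_cons_self)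
    simp only [List.foldl_cons]
    obtain ⟨hset, hget⟩ := pvSetGet res p 0 (PySem.List.pyGetD res p 0 + 1) h0 h1
    rw [hset]
    have hlen : (res.set p.toNat (PySem.List.pyGetD res p 0 + 1)).length = res.length := by simp
    obtain ⟨ihl, ihv⟩ := ih (res.set p.toNat (PySem.List.pyGetD res p 0 + 1))
      (fun q hq => by rw [hlen]; exact hb q (List.mem_cons_of_mem p hq))
    refine ⟨by rw [ihl, hlen], ?_⟩
    intro j hj
    rw [ihv j (by rw [hlen]; exact hj)]
    rw [pvGetD_set res p.toNat j _ 0 (by omega), hget]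
    rw [List.count_cons]
    by_cases hjp : j = p.toNat
    · have h4 : (p == (j:Int)) = true := by simp; omega
      rw [if_pos hjp, h4]
      have h5 : p.toNat = j := by omega
      rw [h5]; push_cast; simp; ring
    · have h4 : (p == (j:Int)) = false := by simp; omega
      rw [if_neg hjp, h4]
      simp

lemma pvScatAll (idx : PySem.Dict Int (List Int)) (n : Nat)
    (hb : ∀ s : Int, ∀ q ∈ idx.getD s [], 0 ≤ q ∧ q < (n:Int)) :
    ∀ (S : List Int) (res : List Int), res.length = n →
    ((S.foldl (fun res s => (idx.getD s []).foldl (fun r p => PySem.List.pySetD r p (PySem.List.pyGetD r p 0 + 1)) res) res).length = n ∧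
     ∀ j : Nat, j < n →
      (S.foldl (fun res s => (idx.getD s []).foldl (fun r p => PySem.List.pySetD r p (PySem.List.pyGetD r p 0 + 1)) res) res).getD j 0
        = res.getD j 0 + (S.map (fun s => ((idx.getD s []).count (j:Int) : Int))).sum) := by
  intro S
  induction S with
  | nil => intro res hres; exact ⟨hres, fun j hj => by simp⟩
  | cons s t ih =>
    intro res hres
    simp only [List.foldl_cons]
    obtain ⟨ol, ov⟩ := pvScatOne (idx.getD s []) res (fun q hq => by rw [hres]; exact hb s q hq)
    obtain ⟨ihl, ihv⟩ := ih _ (by rw [ol]; exact hres)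
    refine ⟨ihl, ?_⟩
    intro j hj
    rw [ihv j hj, ov j (by omega)]
    simp only [List.map_cons, List.sum_cons]
    ring

lemma pvB_char (pastures : List (List Int)) (sheeps : List Int) :
    (findSheepsOnPastures_alt pastures sheeps).length = pastures.length ∧
    ∀ j : Nat, j < pastures.length →
      (findSheepsOnPastures_alt pastures sheeps).getD j 0
        = (sheeps.map (fun s => ((pastures.getD j []).count s : Int))).sum := by
  have hb : ∀ s : Int, ∀ q ∈ (pvBuildIndex pastures).getD s [], 0 ≤ q ∧ q < ((pastures.length:Nat):Int) := by
    intro s q hq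
    rw [pvIdxGetD] at hq
    have := pvIdxMemBound pastures 0 s q hq
    omega
  obtain ⟨hl, hv⟩ := pvScatAll (pvBuildIndex pastures) pastures.length hb sheeps
    (List.replicate pastures.length 0) (by simp)
  unfold findSheepsOnPastures_alt
  refine ⟨hl, ?_⟩
  intro j hj
  rw [hv j hj]
  have h0 : (List.replicate pastures.length (0:Int)).getD j 0 = 0 := by
    rw [List.getD_eq_getElem?_getD]; simp [hj]
  rw [h0, zero_add]
  congr 1
  apply List.map_congr_left
  intro s _
  congr 1
  rw [pvIdxGetD]
  have := pvIdxCount pastures 0 s j hj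
  rw [zero_add] at this
  rw [this]

lemma pvSwap : ∀ (S P : List Int),
    (S.map (fun s => (P.count s : Int))).sum = (P.map (fun c => (S.count c : Int))).sum := by
  intro S
  induction S with
  | nil => intro P; simp
  | cons s t ih =>
    intro P
    simp only [List.map_cons, List.sum_cons]
    rw [ih P]
    have h1 : (P.map (fun c => ((s :: t).count c : Int))) = P.map (fun c => (t.count c : Int) + if (s == c) then 1 else 0) := by
      apply List.map_congr_left
      intro c _
      rw [List.count_cons]
      by_cases hsc : (s == c) = true
      · rw [if_pos hsc, if_pos hsc]; push_cast; ring
      · rw [if_neg hsc, if_neg hsc]; push_cast; ring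
    rw [h1, PySem.List.sum_map_add_int, PySem.List.sum_map_ite_one_zero]
    rw [List.count_eq_countP]
    have h2 : P.countP (fun x => x == s) = P.countP (fun c => s == c) :=
      List.countP_congr (fun a _ => by rw [Bool.beq_comm])
    rw [h2]
    have h3 : (fun c => s == c) = (BEq.beq s) := rfl
    rw [h3]
    ring

lemma pvMain (pastures : List (List Int)) (sheeps : List Int) :
    findSheepsOnPastures pastures sheeps = findSheepsOnPastures_alt pastures sheeps := by
  obtain ⟨al, av⟩ := pvA_char pastures sheeps
  obtain ⟨bl, bv⟩ := pvB_char pastures sheeps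
  apply List.ext_getElem (by rw [al, bl])
  intro j h1 h2
  have hj : j < pastures.length := by rw [al] at h1; exact h1
  rw [List.getElem_eq_getD (0:Int), List.getElem_eq_getD (0:Int), av j hj, bv j hj]
  exact (pvSwap sheeps (pastures.getD j [])).symm

-- ===== VERDICT (by name: the statement is the Claim_ definition above) =====
theorem findSheepsOnPastures_spec : Claim_equal_findSheepsOnPastures := by
  intro pastures sheeps _
  unfold Spec_findSheepsOnPastures
  exact pvMain pastures sheeps
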